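-- pv_equiv track=rewrite | github.com/tacla/VictimSim2 | datasets/tools/ggenerate_data/generate_obsts_and_victims.py | calculate_cells
-- ===== SOURCE A (Python) =====
-- def calculate_cells(col1, row1, col2, row2):
--     cells = [(col1, row1)]
--
--     # Determine the direction of movement for each axis
--     col_step = 1 if col2 > col1 else -1
--     row_step = 1 if row2 > row1 else -1
--
--     # Calculate the absolute differences in positions
--     col_diff = abs(col2 - col1)
--     row_diff = abs(row2 - row1)
--
--     # Determine the direction of movement for diagonals
--     col_diag_step = col_step if col_diff > 0 else 0
--     row_diag_step = row_step if row_diff > 0 else 0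
--
--     # Determine the number of steps required for diagonal movement
--     num_diag_steps = min(col_diff, row_diff)
--
--     # Determine the remaining steps required for orthogonal movement
--     num_ortho_steps_col = col_diff - num_diag_steps
--     num_ortho_steps_row = row_diff - num_diag_steps
--
--     # Add diagonal moves
--     for i in range(1, num_diag_steps + 1):
--         cells.append((col1 + i * col_diag_step, row1 + i * row_diag_step))
--
--     # Add orthogonal moves
--     for i in range(1, num_ortho_steps_col + 1):
--         cells.append((col1 + num_diag_steps * col_diag_step + i * col_step, row1 + num_diag_steps * row_diag_step))
--     for i in range(1, num_ortho_steps_row + 1):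
--         cells.append((col1 + num_diag_steps * col_diag_step, row1 + num_diag_steps * row_diag_step + i * row_step))
--
--     return cells
-- ===== SOURCE B (Python) =====
-- def calculate_cells(col1, row1, col2, row2):
--     # One incremental walk toward the target instead of three precomputed index-formula loops.
--     cells = [(col1, row1)]
--     c, r = col1, row1
--     while c != col2 or r != row2:
--         if c != col2:
--             c += 1 if col2 > c else -1
--         if r != row2:
--             r += 1 if row2 > r else -1
--         cells.append((c, r))
--     return cells
-- ===== Notes on version B (the rewrite author's own statement) =====
-- stated objective: simpler
-- what changed: Replaces A's three precomputed closed-formula phase loops (diagonal, column-orthogonal, row-orthogonal, each indexing from the start point) with a single stateful while-walk that steps the current cell one unit toward the target per iteration.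
import Mathlib
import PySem

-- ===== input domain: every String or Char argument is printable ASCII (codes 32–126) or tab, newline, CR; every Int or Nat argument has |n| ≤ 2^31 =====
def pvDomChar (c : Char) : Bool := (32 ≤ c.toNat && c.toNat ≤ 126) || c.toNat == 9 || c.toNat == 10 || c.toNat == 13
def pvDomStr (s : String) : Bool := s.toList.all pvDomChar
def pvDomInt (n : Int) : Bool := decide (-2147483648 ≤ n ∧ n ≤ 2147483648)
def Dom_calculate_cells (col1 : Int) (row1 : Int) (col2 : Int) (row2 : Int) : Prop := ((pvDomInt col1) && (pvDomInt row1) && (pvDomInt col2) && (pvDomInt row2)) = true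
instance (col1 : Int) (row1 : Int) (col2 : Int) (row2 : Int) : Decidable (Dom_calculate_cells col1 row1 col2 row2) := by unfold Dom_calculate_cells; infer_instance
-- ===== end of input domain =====

-- B replaces A's three precomputed closed-formula phase loops with a single
-- incremental walk stepping one cell toward the target per iteration (objective: simpler).

-- ===== PORT A =====
def calculate_cells (col1 : Int) (row1 : Int) (col2 : Int) (row2 : Int) : List (Int × Int) :=
  let cells : List (Int × Int) := [(col1, row1)]
  let col_step : Int := if col2 > col1 then 1 else -1
  let row_step : Int := if row2 > row1 then 1 else -1
  let col_diff : Int := |col2 - col1|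
  let row_diff : Int := |row2 - row1|
  let col_diag_step : Int := if col_diff > 0 then col_step else 0
  let row_diag_step : Int := if row_diff > 0 then row_step else 0
  let num_diag_steps : Int := min col_diff row_diff
  let num_ortho_steps_col : Int := col_diff - num_diag_steps
  let num_ortho_steps_row : Int := row_diff - num_diag_steps
  let cells := (PySem.List.pyRange 1 (num_diag_steps + 1) 1).foldl
    (fun acc i => acc ++ [(col1 + i * col_diag_step, row1 + i * row_diag_step)]) cells
  let cells := (PySem.List.pyRange 1 (num_ortho_steps_col + 1) 1).foldl
    (fun acc i => acc ++ [(col1 + num_diag_steps * col_diag_step + i * col_step,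
                           row1 + num_diag_steps * row_diag_step)]) cells
  let cells := (PySem.List.pyRange 1 (num_ortho_steps_row + 1) 1).foldl
    (fun acc i => acc ++ [(col1 + num_diag_steps * col_diag_step,
                           row1 + num_diag_steps * row_diag_step + i * row_step)]) cells
  cells

-- ===== PORT B =====
-- fuel is only a totality guard for the while loop: it equals the walk's exact
-- remaining step count, so it never cuts the loop short.
def walkB (col2 : Int) (row2 : Int) : Nat → Int → Int → List (Int × Int)
  | 0, _, _ => []
  | fuel+1, c, r =>
    if c = col2 ∧ r = row2 then []
    else
      let c' : Int := if c ≠ col2 then c + (if col2 > c then 1 else -1) else c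
      let r' : Int := if r ≠ row2 then r + (if row2 > r then 1 else -1) else r
      (c', r') :: walkB col2 row2 fuel c' r'

def calculate_cells_alt (col1 : Int) (row1 : Int) (col2 : Int) (row2 : Int) : List (Int × Int) :=
  (col1, row1) :: walkB col2 row2 ((col2 - col1).natAbs + (row2 - row1).natAbs) col1 row1

-- ===== PRECONDITION & SPEC =====
def Spec_calculate_cells (col1 : Int) (row1 : Int) (col2 : Int) (row2 : Int) (out : List (Int × Int)) : Prop := out = calculate_cells_alt col1 row1 col2 row2
instance (col1 : Int) (row1 : Int) (col2 : Int) (row2 : Int) (out : List (Int × Int)) : Decidable (Spec_calculate_cells col1 row1 col2 row2 out) := by unfold Spec_calculate_cells; infer_instance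

-- ===== CLAIM (what is proved, stated in full; the proofs are below) =====
def Claim_equal_calculate_cells : Prop := ∀ (col1 : Int) (row1 : Int) (col2 : Int) (row2 : Int), Dom_calculate_cells col1 row1 col2 row2 → Spec_calculate_cells col1 row1 col2 row2 (calculate_cells col1 row1 col2 row2)

-- ===== LEMMAS AND PROOFS =====

-- the walk written as pure structural recursion on the two remaining axis distances
def segs (c r cs rs : Int) : Nat → Nat → List (Int × Int)
  | 0, 0 => []
  | m+1, 0 => (c+cs, r) :: segs (c+cs) r cs rs m 0
  | 0, n+1 => (c, r+rs) :: segs c (r+rs) cs rs 0 n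
  | m+1, n+1 => (c+cs, r+rs) :: segs (c+cs) (r+rs) cs rs m n

-- A's three phase lists, with the distances as Nats
def Aform (c r cs rs : Int) (m n : Nat) : List (Int × Int) :=
  let cds : Int := if 0 < m then cs else 0
  let rds : Int := if 0 < n then rs else 0
  let d : Nat := min m n
  (List.range d).map (fun (k : Nat) => (c + (1+(k:Int))*cds, r + (1+(k:Int))*rds))
  ++ (List.range (m - d)).map (fun (k : Nat) => (c + (d:Int)*cds + (1+(k:Int))*cs, r + (d:Int)*rds))
  ++ (List.range (n - d)).map (fun (k : Nat) => (c + (d:Int)*cds, r + (d:Int)*rds + (1+(k:Int))*rs))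

lemma map_range_peel {α : Type} (n : Nat) (f g : Nat → α)
    (h : ∀ i, f (i+1) = g i) :
    (List.range (n+1)).map f = f 0 :: (List.range n).map g := by
  rw [List.range_succ_eq_map]
  simp only [List.map_cons, List.map_map]
  congr 1
  exact List.map_congr_left (fun i _ => h i)

lemma segs_cs_irrel (c r cs cs' rs : Int) (n : Nat) :
    segs c r cs rs 0 n = segs c r cs' rs 0 n := by
  induction n generalizing r with
  | zero => simp [segs]
  | succ n ih => simp only [segs]; rw [ih]

lemma segs_rs_irrel (c r cs rs rs' : Int) (m : Nat) :
    segs c r cs rs m 0 = segs c r cs rs' m 0 := by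
  induction m generalizing c with
  | zero => simp [segs]
  | succ m ih => simp only [segs]; rw [ih]

lemma map_congr_fn {α : Type} (n n' : Nat) (f g : Nat → α) (hn : n = n')
    (h : ∀ i, f i = g i) :
    (List.range n).map f = (List.range n').map g := by
  subst hn; exact List.map_congr_left (fun i _ => h i)

lemma map_range_cons {α : Type} (n : Nat) (f g : Nat → α) (a : α) (h0 : f 0 = a)
    (h : ∀ i, f (i+1) = g i) :
    (List.range (n+1)).map f = a :: (List.range n).map g := by
  rw [map_range_peel n f g h, h0]

lemma Aform_eq_segs (c r cs rs : Int) (m n : Nat) :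
    Aform c r cs rs m n = segs c r cs rs m n := by
  induction m generalizing c r n with
  | zero =>
    induction n generalizing r with
    | zero => simp [Aform, segs]
    | succ n ihn =>
      rw [show segs c r cs rs 0 (n+1) = (c, r+rs) :: segs c (r+rs) cs rs 0 n by
            simp [segs], ← ihn]
      simp only [Aform, Nat.zero_min, Nat.sub_zero, Nat.sub_self, List.range_zero,
        List.map_nil, List.nil_append, List.append_nil, lt_self_iff_false, if_false,
        Nat.zero_lt_succ, if_true, Nat.cast_zero, zero_mul, add_zero]
      apply map_range_cons
      · norm_num
      · intro i
        simp only [Prod.mk.injEq, true_and]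
        push_cast; ring
  | succ m ihm =>
    cases n with
    | zero =>
      rw [show segs c r cs rs (m+1) 0 = (c+cs, r) :: segs (c+cs) r cs rs m 0 by
            simp [segs], ← ihm]
      simp only [Aform, Nat.min_zero, Nat.sub_zero, Nat.sub_self, List.range_zero,
        List.map_nil, List.nil_append, List.append_nil, lt_self_iff_false, if_false,
        Nat.zero_lt_succ, if_true, Nat.cast_zero, zero_mul, add_zero]
      apply map_range_cons
      · norm_num
      · intro i
        simp only [Prod.mk.injEq, and_true]
        push_cast; ring
    | succ n =>
      rw [show segs c r cs rs (m+1) (n+1) = (c+cs, r+rs) :: segs (c+cs) (r+rs) cs rs m n by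
            simp [segs], ← ihm]
      simp only [Aform, Nat.zero_lt_succ, if_true, Nat.succ_min_succ, Nat.succ_sub_succ]
      by_cases hm : m = 0
      · subst hm
        simp only [Nat.zero_min, Nat.sub_zero, Nat.sub_self, List.range_zero,
          List.map_nil, List.nil_append, List.append_nil, lt_self_iff_false, if_false,
          List.range_one, List.map_cons, Nat.cast_zero, Nat.cast_one, zero_mul,
          add_zero, List.cons_append, List.nil_append]
        simp only [one_mul]
      · by_cases hn : n = 0
        · subst hn
          simp only [Nat.min_zero, Nat.sub_zero, Nat.sub_self, List.range_zero,
            List.map_nil, List.nil_append, List.append_nil, lt_self_iff_false, if_false,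
            List.range_one, List.map_cons, Nat.cast_zero, Nat.cast_one, zero_mul,
            add_zero, List.cons_append, List.nil_append]
          simp only [one_mul]
        · -- both m and n positive: all three segments align pointwise
          simp only [if_pos (Nat.pos_of_ne_zero hm), if_pos (Nat.pos_of_ne_zero hn)]
          rw [List.range_succ_eq_map, List.map_cons, List.map_map, List.cons_append,
            List.cons_append]
          simp only [Nat.cast_zero, List.cons.injEq]
          refine ⟨by norm_num, ?_⟩
          congr 1
          · congr 1
            · apply map_congr_fn _ _ _ _ rfl
              intro i
              simp only [Function.comp_apply, Nat.succ_eq_add_one, Prod.mk.injEq]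
              constructor <;> push_cast <;> ring
            · apply map_congr_fn _ _ _ _ rfl
              intro i
              simp only [Nat.succ_eq_add_one, Prod.mk.injEq]
              constructor <;> push_cast <;> ring
          · apply map_congr_fn _ _ _ _ rfl
            intro i
            simp only [Nat.succ_eq_add_one, Prod.mk.injEq]
            constructor <;> push_cast <;> ring

lemma segs_sign_congr (c r cs cs' rs rs' : Int) (m n : Nat)
    (hcs : m ≠ 0 → cs = cs') (hrs : n ≠ 0 → rs = rs') :
    segs c r cs rs m n = segs c r cs' rs' m n := by
  cases m with
  | zero =>
    cases n with
    | zero => simp [segs]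
    | succ n => rw [hrs (by omega)]; exact segs_cs_irrel _ _ _ _ _ _
  | succ m =>
    rw [hcs (by omega)]
    cases n with
    | zero => exact segs_rs_irrel _ _ _ _ _ _
    | succ n => rw [hrs (by omega)]

lemma walkB_eq_segs (col2 row2 : Int) (fuel : Nat) (c r : Int)
    (hf : (col2 - c).natAbs + (row2 - r).natAbs ≤ fuel) :
    walkB col2 row2 fuel c r =
      segs c r (if col2 > c then 1 else -1) (if row2 > r then 1 else -1)
        (col2 - c).natAbs (row2 - r).natAbs := by
  induction fuel generalizing c r with
  | zero =>
    rw [show (col2 - c).natAbs = 0 by omega, show (row2 - r).natAbs = 0 by omega]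
    simp [walkB, segs]
  | succ fuel ih =>
    by_cases hc : c = col2 <;> by_cases hr : r = row2
    · subst hc; subst hr
      simp [walkB, segs]
    · subst hc
      have hstep : walkB c row2 (fuel+1) c r =
          (c, r + (if row2 > r then 1 else -1)) ::
            walkB c row2 fuel c (r + (if row2 > r then 1 else -1)) := by
        simp [walkB, hr]
      have hn : (row2 - r).natAbs = (row2 - (r + (if row2 > r then 1 else -1))).natAbs + 1 := by
        split_ifs <;> omega
      rw [hstep, ih _ _ (by split_ifs <;> omega), hn, sub_self, Int.natAbs_zero,
        show ∀ (a b : Int) (k : Nat), segs c r a b 0 (k+1) =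
          (c, r + b) :: segs c (r + b) a b 0 k from fun a b k => by simp [segs]]
      refine congrArg₂ _ rfl ?_
      exact segs_sign_congr _ _ _ _ _ _ _ _ (fun h => absurd rfl (by omega))
        (fun h => by split_ifs <;> omega)
    · subst hr
      have hstep : walkB col2 r (fuel+1) c r =
          (c + (if col2 > c then 1 else -1), r) ::
            walkB col2 r fuel (c + (if col2 > c then 1 else -1)) r := by
        simp [walkB, hc]
      have hm : (col2 - c).natAbs = (col2 - (c + (if col2 > c then 1 else -1))).natAbs + 1 := by
        split_ifs <;> omega
      rw [hstep, ih _ _ (by split_ifs <;> omega), hm, sub_self, Int.natAbs_zero,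
        show ∀ (a b : Int) (k : Nat), segs c r a b (k+1) 0 =
          (c + a, r) :: segs (c + a) r a b k 0 from fun a b k => by simp [segs]]
      refine congrArg₂ _ rfl ?_
      exact segs_sign_congr _ _ _ _ _ _ _ _ (fun h => by split_ifs <;> omega)
        (fun h => absurd rfl (by omega))
    · have hstep : walkB col2 row2 (fuel+1) c r =
          (c + (if col2 > c then 1 else -1), r + (if row2 > r then 1 else -1)) ::
            walkB col2 row2 fuel (c + (if col2 > c then 1 else -1))
              (r + (if row2 > r then 1 else -1)) := by
        simp [walkB, hc, hr]
      have hm : (col2 - c).natAbs = (col2 - (c + (if col2 > c then 1 else -1))).natAbs + 1 := by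
        split_ifs <;> omega
      have hn : (row2 - r).natAbs = (row2 - (r + (if row2 > r then 1 else -1))).natAbs + 1 := by
        split_ifs <;> omega
      rw [hstep, ih _ _ (by split_ifs <;> omega), hm, hn,
        show ∀ (a b : Int) (k l : Nat), segs c r a b (k+1) (l+1) =
          (c + a, r + b) :: segs (c + a) (r + b) a b k l from fun a b k l => by simp [segs]]
      refine congrArg₂ _ rfl ?_
      exact segs_sign_congr _ _ _ _ _ _ _ _ (fun h => by split_ifs <;> omega)
        (fun h => by split_ifs <;> omega)

lemma calculate_cells_eq_Aform (col1 row1 col2 row2 : Int) :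
    calculate_cells col1 row1 col2 row2 =
      (col1, row1) :: Aform col1 row1 (if col2 > col1 then 1 else -1)
        (if row2 > row1 then 1 else -1) (col2 - col1).natAbs (row2 - row1).natAbs := by
  unfold calculate_cells Aform
  simp only [PySem.List.foldl_append_singleton_eq_map, PySem.List.pyRange_one,
    List.map_map, add_sub_cancel_right, Int.abs_eq_natAbs, ← Nat.cast_min,
    Int.toNat_natCast, gt_iff_lt, Int.natCast_pos,
    List.cons_append, List.nil_append, List.append_assoc, Function.comp_def]
  rw [show ((((col2 - col1).natAbs : Int) - (min (col2 - col1).natAbs (row2 - row1).natAbs : Nat))).toNat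
        = (col2 - col1).natAbs - min (col2 - col1).natAbs (row2 - row1).natAbs by omega,
      show ((((row2 - row1).natAbs : Int) - (min (col2 - col1).natAbs (row2 - row1).natAbs : Nat))).toNat
        = (row2 - row1).natAbs - min (col2 - col1).natAbs (row2 - row1).natAbs by omega]

-- ===== VERDICT (by name: the statement is the Claim_ definition above) =====
theorem calculate_cells_spec : Claim_equal_calculate_cells := by
  intro col1 row1 col2 row2 _
  unfold Spec_calculate_cells calculate_cells_alt
  rw [calculate_cells_eq_Aform, Aform_eq_segs, walkB_eq_segs _ _ _ _ _ le_rfl]
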